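-- pv_equiv track=rewrite | github.com/kurbanbek31/Kurbanbek | LAB3/func1.py | unique_array
-- ===== SOURCE A (Python) =====
-- def unique_array(lst):
--     ans = []
--     for i in range(len(lst)):
--         check = False
--         for j in range(len(lst)):
--             if lst[i] == lst[j]:
--                 if i != j:
--                     check = True
--         if check != 1:
--             ans.append(lst[i])
--     return ans
-- ===== SOURCE B (Python) =====
-- def unique_array(lst):
--     counts = {}
--     for x in lst:
--         counts[x] = counts.get(x, 0) + 1
--     return [x for x in lst if counts[x] == 1]
-- ===== Notes on version B (the rewrite author's own statement) =====
-- stated objective: faster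
-- what changed: Replaced the quadratic nested scan (for each element, rescan the whole list for another equal element) by a single counting pass with a dict followed by one filter pass.
import Mathlib
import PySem

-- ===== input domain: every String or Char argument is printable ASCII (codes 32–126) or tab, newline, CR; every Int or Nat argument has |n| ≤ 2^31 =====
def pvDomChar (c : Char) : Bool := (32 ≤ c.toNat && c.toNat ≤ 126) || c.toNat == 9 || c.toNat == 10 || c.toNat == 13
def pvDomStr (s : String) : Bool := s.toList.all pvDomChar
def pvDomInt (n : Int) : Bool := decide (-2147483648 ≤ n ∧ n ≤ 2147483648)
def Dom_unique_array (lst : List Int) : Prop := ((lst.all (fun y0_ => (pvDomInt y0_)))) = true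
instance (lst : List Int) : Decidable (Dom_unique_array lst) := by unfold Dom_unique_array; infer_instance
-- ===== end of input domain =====

-- B replaces A's quadratic nested scan by one dict-counting pass plus a filter (O(n^2) → O(n)).

-- ===== PORT A =====
-- literal port of A: for each index i, rescan all indices j looking for another equal
-- element; append lst[i] when none is found (indices are always in range, so pyGetD is exact).
def unique_array (lst : List Int) : List Int :=
  (PySem.List.pyRange 0 lst.length 1).foldl (fun ans i =>
    let check := (PySem.List.pyRange 0 lst.length 1).foldl (fun check j =>
      if PySem.List.pyGetD lst i 0 == PySem.List.pyGetD lst j 0 then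
        if i ≠ j then true else check
      else check) false
    if check != true then ans ++ [PySem.List.pyGetD lst i 0] else ans) []

-- ===== PORT B =====
-- literal port of Source B: build the count dict in one pass, then filter.
def unique_array_alt (lst : List Int) : List Int :=
  let counts := lst.foldl (fun d x => d.insert x (d.getD x 0 + 1)) (PySem.Dict.empty : PySem.Dict Int Int)
  lst.filter (fun x => counts.getD x 0 == 1)

-- ===== PRECONDITION & SPEC =====
def Spec_unique_array (lst : List Int) (out : List Int) : Prop := out = unique_array_alt lst
instance (lst : List Int) (out : List Int) : Decidable (Spec_unique_array lst out) := by unfold Spec_unique_array; infer_instance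

-- ===== CLAIM (what is proved, stated in full; the proofs are below) =====
def Claim_equal_unique_array : Prop := ∀ (lst : List Int), Dom_unique_array lst → Spec_unique_array lst (unique_array lst)

-- ===== LEMMAS AND PROOFS =====

-- B computes lst.filter (count == 1)
theorem alt_eq_filter_count (lst : List Int) :
    unique_array_alt lst = lst.filter (fun x => lst.count x == 1) := by
  unfold unique_array_alt
  simp only []
  rw [PySem.Dict.foldl_insert_getD_add_one_eq_counter]
  refine List.filter_congr ?_
  intro x _
  rw [PySem.Dict.getD_counter]
  simp [Nat.cast_eq_one]

-- the inner loop is an 'any' over the scanned indices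
theorem inner_eq_any (x i : Int) (g : Int → Int) (l : List Int) (b : Bool) :
    l.foldl (fun c j => if x == g j then if i ≠ j then true else c else c) b
      = (b || l.any (fun j => (x == g j) && !(i == j))) := by
  induction l generalizing b with
  | nil => simp
  | cons a t ih =>
    simp only [List.foldl_cons, List.any_cons, ih]
    by_cases h1 : x = g a
    · by_cases h2 : i = a
      · simp [h1, h2]
      · have e2 : (i == a) = false := by simp [h2]
        simp [h1, e2]
        exact Or.inl (Or.inl h2)
    · have e1 : (x == g a) = false := by simp [h1]
      simp [e1]

-- two distinct positions holding the same value ↔ that value has count ≥ 2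
theorem two_le_count_iff (l : List Int) (k : Nat) (hk : k < l.length) :
    (∃ m : Nat, ∃ _ : m < l.length, m ≠ k ∧ l[m] = l[k]) ↔ 2 ≤ l.count l[k] := by
  rw [← List.duplicate_iff_two_le_count, List.duplicate_iff_exists_distinct_get]
  constructor
  · rintro ⟨m, hm, hmk, hval⟩
    rcases Nat.lt_or_gt_of_ne hmk with h | h
    · exact ⟨⟨m, hm⟩, ⟨k, hk⟩, h, hval.symm, rfl⟩
    · exact ⟨⟨k, hk⟩, ⟨m, hm⟩, h, rfl, hval.symm⟩
  · rintro ⟨⟨n, hn⟩, ⟨m, hm⟩, hlt, h1, h2⟩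
    by_cases hnk : n = k
    · exact ⟨m, hm, by simp at hlt; omega, by simp_all⟩
    · exact ⟨n, hn, hnk, by simp_all⟩

theorem filter_map_comm (l : List Int) (f : Int → Int) (p : Int → Bool) :
    (l.filter (fun i => p (f i))).map f = (l.map f).filter p := by
  induction l with
  | nil => rfl
  | cons a t ih => by_cases h : p (f a) <;> simp [h, ih]

theorem unique_array_eq_filter_count (lst : List Int) :
    unique_array lst = lst.filter (fun x => lst.count x == 1) := by
  unfold unique_array
  simp only [inner_eq_any, Bool.false_or]
  rw [PySem.List.foldl_append_if
      (fun i => ((PySem.List.pyRange 0 lst.length 1).any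
        (fun j => (PySem.List.pyGetD lst i 0 == PySem.List.pyGetD lst j 0) && !(i == j))) != true)
      (fun i => PySem.List.pyGetD lst i 0)]
  rw [List.filter_congr (l := PySem.List.pyRange 0 lst.length 1)
      (q := fun i => lst.count (PySem.List.pyGetD lst i 0) == 1) ?_]
  · rw [List.nil_append,
      filter_map_comm (PySem.List.pyRange 0 lst.length 1)
        (fun i => PySem.List.pyGetD lst i 0) (fun x => lst.count x == 1),
      PySem.List.map_pyGetD_pyRange_zero' lst 0]
  · intro i hi
    rw [PySem.List.mem_pyRange_one] at hi
    obtain ⟨h0, hlen⟩ := hi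
    beta_reduce
    have hk : i.toNat < lst.length := by omega
    rw [PySem.List.pyGetD_eq_getElem lst 0 h0 (by simpa using hlen)]
    have hcnt1 : 1 ≤ lst.count lst[i.toNat] := List.one_le_count_iff.mpr (lst.getElem_mem hk)
    have hany : ((PySem.List.pyRange 0 lst.length 1).any
        (fun j => (lst[i.toNat] == PySem.List.pyGetD lst j 0) && !(i == j))) = true
        ↔ 2 ≤ lst.count lst[i.toNat] := by
      rw [List.any_eq_true, ← two_le_count_iff lst i.toNat hk]
      constructor
      · rintro ⟨j, hj, hjp⟩
        rw [PySem.List.mem_pyRange_one] at hj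
        simp only [Bool.and_eq_true, beq_iff_eq, Bool.not_eq_eq_eq_not, Bool.not_true,
          beq_eq_false_iff_ne, ne_eq] at hjp
        refine ⟨j.toNat, by omega, by omega, ?_⟩
        rw [← PySem.List.pyGetD_eq_getElem lst 0 (by omega) (by simpa using hj.2)]
        exact hjp.1.symm
      · rintro ⟨m, hm, hmk, hval⟩
        refine ⟨(m : Int), ?_, ?_⟩
        · rw [PySem.List.mem_pyRange_one]; constructor <;> omega
        · simp only [Bool.and_eq_true, beq_iff_eq, Bool.not_eq_eq_eq_not, Bool.not_true,
            beq_eq_false_iff_ne, ne_eq]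
          refine ⟨?_, by omega⟩
          rw [PySem.List.pyGetD_eq_getElem lst (i := (m : Int)) 0 (by omega) (by simpa using hm)]
          simp [hval]
    by_cases hd : 2 ≤ lst.count lst[i.toNat]
    · rw [hany.mpr hd]
      simp
      omega
    · have hf : ((PySem.List.pyRange 0 lst.length 1).any
          (fun j => (lst[i.toNat] == PySem.List.pyGetD lst j 0) && !(i == j))) = false := by
        cases hb : ((PySem.List.pyRange 0 lst.length 1).any
            (fun j => (lst[i.toNat] == PySem.List.pyGetD lst j 0) && !(i == j)))
        · rfl
        · exact absurd (hany.mp hb) hd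
      rw [hf]
      simp
      omega

-- ===== VERDICT (by name: the statement is the Claim_ definition above) =====
theorem unique_array_spec : Claim_equal_unique_array := by
  intro lst _
  unfold Spec_unique_array
  rw [alt_eq_filter_count, unique_array_eq_filter_count]
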